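-- pv_equiv track=rewrite | github.com/haolunc/ARC-RL | reference_solutions/solutions/b9b7f026.py | transform
-- ===== SOURCE A (Python) =====
-- def transform(grid):
--
--     h = len(grid)
--     w = len(grid[0])
--
--     from collections import defaultdict
--     cells = defaultdict(list)
--     for r in range(h):
--         for c in range(w):
--             col = grid[r][c]
--             if col != 0:
--                 cells[col].append((r, c))
--
--     def is_solid_rect(pos):
--         rows = [p[0] for p in pos]
--         cols = [p[1] for p in pos]
--         rmin, rmax = min(rows), max(rows)
--         cmin, cmax = min(cols), max(cols)
--         expected = (rmax - rmin + 1) * (cmax - cmin + 1)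
--         return expected == len(pos)
--
--     odd_colour = None
--     for col, pos in cells.items():
--         if not is_solid_rect(pos):
--             odd_colour = col
--             break
--
--     if odd_colour is None:
--         odd_colour = next(iter(cells))
--
--     return [[odd_colour]]
-- ===== SOURCE B (Python) =====
-- def transform(grid):
--     h = len(grid)
--     w = len(grid[0])
--
--     # one pass: per colour keep a running bounding box and cell count
--     boxes = {}
--     for r in range(h):
--         for c in range(w):
--             col = grid[r][c]
--             if col != 0:
--                 b = boxes.get(col)
--                 if b is None:
--                     boxes[col] = (r, r, c, c, 1)
--                 else:
--                     rmin, rmax, cmin, cmax, n = b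
--                     boxes[col] = (min(rmin, r), max(rmax, r),
--                                   min(cmin, c), max(cmax, c), n + 1)
--
--     for col, (rmin, rmax, cmin, cmax, n) in boxes.items():
--         if (rmax - rmin + 1) * (cmax - cmin + 1) != n:
--             return [[col]]
--
--     return [[next(iter(boxes))]]
-- ===== Notes on version B (the rewrite author's own statement) =====
-- stated objective: simpler
-- what changed: Instead of grouping every nonzero cell's coordinates into per-colour position lists and then recomputing min/max/length over each list, B keeps only a running bounding box and count per colour in one streaming pass and compares count with box area.
-- outside the precondition, e.g. on transform([]): A raises IndexError, B raises IndexError; on transform([[0, 0], [0, 0]]): A raises StopIteration, B raises StopIteration; on transform([[1, 2], [3]]): A raises IndexError, B raises IndexError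
import Mathlib
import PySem

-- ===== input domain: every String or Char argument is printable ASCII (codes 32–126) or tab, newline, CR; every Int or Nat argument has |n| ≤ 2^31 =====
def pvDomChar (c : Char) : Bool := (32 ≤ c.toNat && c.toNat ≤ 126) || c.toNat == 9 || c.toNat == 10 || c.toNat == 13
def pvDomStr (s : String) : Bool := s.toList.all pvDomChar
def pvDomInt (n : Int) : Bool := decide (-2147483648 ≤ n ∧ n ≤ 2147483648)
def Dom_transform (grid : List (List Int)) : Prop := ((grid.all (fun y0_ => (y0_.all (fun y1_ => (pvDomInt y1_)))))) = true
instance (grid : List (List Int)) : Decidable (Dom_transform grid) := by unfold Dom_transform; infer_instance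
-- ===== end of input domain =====

-- B replaces A's per-colour position lists (re-scanned for min/max/len afterwards) by a
-- streaming per-colour bounding box + count compared with the box area; objective: simpler.

-- ===== PORT A =====
-- is_solid_rect(pos); pos is nonempty wherever this is called (dict values are built by
-- append), so Python's min/max never raise; the .getD 0 defaults are unreachable there.
def isSolidRect (pos : List (Int × Int)) : Bool :=
  let rows := pos.map (fun p => p.1)
  let cols := pos.map (fun p => p.2)
  let rmin := (PySem.List.min? rows (fun y => y)).getD 0
  let rmax := (PySem.List.max? rows (fun y => y)).getD 0
  let cmin := (PySem.List.min? cols (fun y => y)).getD 0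
  let cmax := (PySem.List.max? cols (fun y => y)).getD 0
  let expected := (rmax - rmin + 1) * (cmax - cmin + 1)
  decide (expected = (pos.length : Int))

-- the nested 'for r / for c' loop building the defaultdict(list) of per-colour positions
def buildCells (grid : List (List Int)) : PySem.Dict Int (List (Int × Int)) :=
  (PySem.List.pyRange 0 grid.length 1).foldl (fun d r =>
    (PySem.List.pyRange 0 ((PySem.List.pyGetD grid 0 []).length : Int) 1).foldl (fun d c =>
      let col := PySem.List.pyGetD (PySem.List.pyGetD grid r []) c 0  -- grid[r][c]; in range under Pre_
      if col ≠ 0 then d.modify col [] (fun l => l ++ [(r, c)]) else d) d)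
    PySem.Dict.empty

-- the 'for col, pos in cells.items(): … break' loop: first colour that is not a solid rectangle
def findOddA : List (Int × List (Int × Int)) → Option Int
  | [] => none
  | (col, pos) :: rest => if ¬ isSolidRect pos then some col else findOddA rest

def transform (grid : List (List Int)) : List (List Int) :=
  match findOddA (buildCells grid).items with
  | some col => [[col]]
  | none => [[(buildCells grid).keys.headD 0]]   -- next(iter(cells)); Pre_ excludes the empty dict (StopIteration)

-- ===== PORT B =====
-- widen a bounding box (rmin, rmax, cmin, cmax, n) by one cell (r, c)
def widenBox (b : Int × Int × Int × Int × Int) (r c : Int) : Int × Int × Int × Int × Int :=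
  (min b.1 r, max b.2.1 r, min b.2.2.1 c, max b.2.2.2.1 c, b.2.2.2.2 + 1)

-- B's single pass: per colour a running bounding box and count
def buildBoxes (grid : List (List Int)) : PySem.Dict Int (Int × Int × Int × Int × Int) :=
  (PySem.List.pyRange 0 grid.length 1).foldl (fun d r =>
    (PySem.List.pyRange 0 ((PySem.List.pyGetD grid 0 []).length : Int) 1).foldl (fun d c =>
      let col := PySem.List.pyGetD (PySem.List.pyGetD grid r []) c 0  -- grid[r][c]; in range under Pre_
      if col ≠ 0 then
        match d.get? col with                    -- boxes.get(col)
        | none => d.insert col (r, r, c, c, 1)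
        | some b => d.insert col (widenBox b r c)
      else d) d)
    PySem.Dict.empty

-- the scan of boxes.items(): return at the first colour whose count differs from its box area
def findOddB : List (Int × (Int × Int × Int × Int × Int)) → Option Int
  | [] => none
  | (col, b) :: rest =>
      if (b.2.1 - b.1 + 1) * (b.2.2.2.1 - b.2.2.1 + 1) ≠ b.2.2.2.2 then some col else findOddB rest

def transform_alt (grid : List (List Int)) : List (List Int) :=
  match findOddB (buildBoxes grid).items with
  | some col => [[col]]
  | none => [[(buildBoxes grid).keys.headD 0]]   -- next(iter(boxes)); empty dict excluded by Pre_

-- ===== PRECONDITION & SPEC =====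
-- Pre_ excludes exactly the inputs on which the Python raises: the empty grid (grid[0] → IndexError),
-- grids with a row shorter than row 0 (grid[r][c] → IndexError), and grids with no nonzero cell in
-- the first len(grid[0]) columns (next(iter(cells)) → StopIteration).
def Pre_transform (grid : List (List Int)) : Prop :=
  grid ≠ [] ∧ (∀ row ∈ grid, grid.headI.length ≤ row.length) ∧
    (∃ row ∈ grid, ∃ x ∈ row.take grid.headI.length, x ≠ 0)
instance (grid : List (List Int)) : Decidable (Pre_transform grid) := by
  unfold Pre_transform; infer_instance
def pvWitness_transform : List (List Int) := [[1, 1], [1, 0]]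

def Spec_transform (grid : List (List Int)) (out : List (List Int)) : Prop := out = transform_alt grid
instance (grid : List (List Int)) (out : List (List Int)) : Decidable (Spec_transform grid out) := by unfold Spec_transform; infer_instance

-- ===== CLAIM (what is proved, stated in full; the proofs are below) =====
def Claim_equal_transform : Prop := ∀ (grid : List (List Int)), Dom_transform grid → Pre_transform grid → Spec_transform grid (transform grid)

-- ===== LEMMAS AND PROOFS =====

-- bounding-box statistics of a nonempty position list ([] gets a junk value, never used)
def stats : List (Int × Int) → Int × Int × Int × Int × Int
  | [] => (0, 0, 0, 0, 0)
  | q :: t => t.foldl (fun b q' => widenBox b q'.1 q'.2) (q.1, q.1, q.2, q.2, 1)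

-- the invariant tying A's dict of position lists to B's dict of boxes
def DInv (dA : PySem.Dict Int (List (Int × Int))) (dB : PySem.Dict Int (Int × Int × Int × Int × Int)) : Prop :=
  dA.keys.Nodup ∧ dB.items = dA.items.map (fun p => (p.1, stats p.2)) ∧ ∀ p ∈ dA.items, p.2 ≠ []

theorem foldl_rel {α β γ : Type} (R : α → β → Prop) (sA : α → γ → α) (sB : β → γ → β)
    (hs : ∀ a b x, R a b → R (sA a x) (sB b x)) :
    ∀ (l : List γ) (a : α) (b : β), R a b → R (l.foldl sA a) (l.foldl sB b) := by
  intro l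
  induction l with
  | nil => intro a b h; exact h
  | cons x t ih => intro a b h; exact ih _ _ (hs a b x h)

theorem stats_append_singleton (pos : List (Int × Int)) (h : pos ≠ []) (q : Int × Int) :
    stats (pos ++ [q]) = widenBox (stats pos) q.1 q.2 := by
  cases pos with
  | nil => exact absurd rfl h
  | cons p t => simp [stats, List.foldl_append]

theorem get?_map_stats (k : Int) :
    ∀ (l : List (Int × List (Int × Int))),
      (PySem.Dict.mk (l.map (fun p => (p.1, stats p.2)))).get? k =
        ((PySem.Dict.mk l).get? k).map stats := by
  intro l
  induction l with
  | nil => simp [PySem.Dict.get?]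
  | cons p t ih =>
      obtain ⟨pk, pv⟩ := p
      simp only [List.map_cons, PySem.Dict.get?_mk_cons]
      by_cases hk : (pk == k) = true
      · rw [if_pos hk, if_pos hk, Option.map_some]
      · rw [if_neg hk, if_neg hk, ih]

theorem dict_eta {κ ν : Type} [BEq κ] (d : PySem.Dict κ ν) : d = PySem.Dict.mk d.items := rfl

theorem get?_of_dinv {dA : PySem.Dict Int (List (Int × Int))}
    {dB : PySem.Dict Int (Int × Int × Int × Int × Int)} (h : DInv dA dB) (k : Int) :
    dB.get? k = (dA.get? k).map stats := by
  obtain ⟨-, hitems, -⟩ := h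
  calc dB.get? k = (PySem.Dict.mk dB.items).get? k := by rw [← dict_eta]
    _ = (PySem.Dict.mk (dA.items.map (fun p => (p.1, stats p.2)))).get? k := by rw [hitems]
    _ = ((PySem.Dict.mk dA.items).get? k).map stats := get?_map_stats k dA.items
    _ = (dA.get? k).map stats := by rw [← dict_eta]

theorem keys_of_dinv {dA : PySem.Dict Int (List (Int × Int))}
    {dB : PySem.Dict Int (Int × Int × Int × Int × Int)} (h : DInv dA dB) : dB.keys = dA.keys := by
  obtain ⟨-, hitems, -⟩ := h
  simp [PySem.Dict.keys, hitems]

-- the per-cell step preserves the invariant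
theorem dinv_step (dA : PySem.Dict Int (List (Int × Int)))
    (dB : PySem.Dict Int (Int × Int × Int × Int × Int)) (col r c : Int) (h : DInv dA dB) :
    DInv (dA.modify col [] (fun l => l ++ [(r, c)]))
        (match dB.get? col with
         | none => dB.insert col (r, r, c, c, 1)
         | some b => dB.insert col (widenBox b r c)) := by
  obtain ⟨hnd, hitems, hne⟩ := h
  have hget := get?_of_dinv ⟨hnd, hitems, hne⟩ col
  unfold PySem.Dict.modify
  cases hA : dA.get? col with
  | none =>
      rw [hget, hA]
      simp only [Option.map_none]
      have hcA : dA.contains col = false := by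
        rw [PySem.Dict.contains_eq_isSome_get?, hA]; rfl
      have hcB : dB.contains col = false := by
        rw [PySem.Dict.contains_eq_isSome_get?, hget, hA]; rfl
      have hgd : dA.getD col [] = [] := PySem.Dict.getD_of_not_contains dA [] hcA
      refine ⟨PySem.Dict.nodup_keys_insert dA col _ hnd, ?_, ?_⟩
      · rw [PySem.Dict.items_insert_of_not_contains dB _ hcB,
          PySem.Dict.items_insert_of_not_contains dA _ hcA, List.map_append, hitems, hgd]
        simp [stats]
      · intro p hp
        rw [PySem.Dict.items_insert_of_not_contains dA _ hcA, hgd] at hp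
        rcases List.mem_append.mp hp with hp | hp
        · exact hne p hp
        · simp at hp; simp [hp]
  | some pos =>
      rw [hget, hA]
      simp only [Option.map_some]
      have hcA : dA.contains col = true := by
        rw [PySem.Dict.contains_eq_isSome_get?, hA]; rfl
      have hcB : dB.contains col = true := by
        rw [PySem.Dict.contains_eq_isSome_get?, hget, hA]; rfl
      have hgd : dA.getD col [] = pos := PySem.Dict.getD_of_get?_eq_some dA [] hA
      have hposne : pos ≠ [] := hne (col, pos) (PySem.Dict.mem_items_of_get?_eq_some dA hA)
      refine ⟨PySem.Dict.nodup_keys_insert dA col _ hnd, ?_, ?_⟩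
      · rw [PySem.Dict.items_insert_of_contains dB _ hcB,
          PySem.Dict.items_insert_of_contains dA _ hcA, hitems, List.map_map, List.map_map]
        apply List.map_congr_left
        intro p hp
        by_cases hk : (p.1 == col) = true
        · simp only [Function.comp, hk, if_pos]
          rw [hgd, stats_append_singleton pos hposne]
        · simp only [Function.comp, hk]
          simp
      · intro p hp
        rw [PySem.Dict.items_insert_of_contains dA _ hcA] at hp
        rcases List.mem_map.mp hp with ⟨p', hp', hpe⟩
        by_cases hk : (p'.1 == col) = true
        · rw [if_pos hk] at hpe; rw [← hpe]; simp [hgd]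
        · rw [if_neg hk] at hpe; rw [← hpe]; exact hne p' hp'

-- min?/max? over a nonempty list of ints is a running min/max fold
theorem min?_id_eq_foldl (x : Int) (t : List Int) :
    (PySem.List.min? (x :: t) (fun y => y)).getD 0 = t.foldl min x := by
  rw [PySem.List.min?_id_cons]; rfl

theorem max?_id_eq_foldl (x : Int) (t : List Int) :
    (PySem.List.max? (x :: t) (fun y => y)).getD 0 = t.foldl max x := by
  rw [PySem.List.max?_id_cons]; rfl

-- the box fold computes componentwise running min/max and the count
theorem stats_foldl_components (t : List (Int × Int)) :
    ∀ (a b c d n : Int),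
      t.foldl (fun b q' => widenBox b q'.1 q'.2) (a, b, c, d, n) =
        (t.foldl (fun m q' => min m q'.1) a, t.foldl (fun m q' => max m q'.1) b,
         t.foldl (fun m q' => min m q'.2) c, t.foldl (fun m q' => max m q'.2) d,
         n + t.length) := by
  induction t with
  | nil => intro a b c d n; simp
  | cons q t ih =>
      intro a b c d n
      simp only [List.foldl_cons]
      rw [show widenBox (a, b, c, d, n) q.1 q.2 =
        (min a q.1, max b q.1, min c q.2, max d q.2, n + 1) from rfl, ih]
      simp only [List.length_cons]
      congr 4
      omega

-- A's rectangle test on a nonempty position list agrees with B's area-vs-count test on its stats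
theorem isSolidRect_eq_stats (pos : List (Int × Int)) (h : pos ≠ []) :
    isSolidRect pos =
      !decide (((stats pos).2.1 - (stats pos).1 + 1) *
        ((stats pos).2.2.2.1 - (stats pos).2.2.1 + 1) ≠ (stats pos).2.2.2.2) := by
  cases pos with
  | nil => exact absurd rfl h
  | cons q t =>
      simp only [isSolidRect, stats, List.map_cons, min?_id_eq_foldl, max?_id_eq_foldl,
        stats_foldl_components, List.foldl_map, List.length_cons]
      simp only [decide_not, Bool.not_not]
      congr 1
      push_cast
      ring_nf

theorem findOdd_eq (l : List (Int × List (Int × Int))) (hne : ∀ p ∈ l, p.2 ≠ []) :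
    findOddB (l.map (fun p => (p.1, stats p.2))) = findOddA l := by
  induction l with
  | nil => rfl
  | cons p t ih =>
      have hs := isSolidRect_eq_stats p.2 (hne p (List.mem_cons_self ..))
      simp only [List.map_cons, findOddA, findOddB]
      by_cases hd : ((stats p.2).2.1 - (stats p.2).1 + 1) *
          ((stats p.2).2.2.2.1 - (stats p.2).2.2.1 + 1) ≠ (stats p.2).2.2.2.2
      · rw [if_pos hd, if_pos (by simp [hs, hd])]
      · rw [if_neg hd, if_neg (by simp [hs, hd])]
        exact ih (fun q hq => hne q (List.mem_cons_of_mem p hq))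

-- the two dict-building scans stay in DInv from start to finish
theorem dinv_loops (grid : List (List Int)) : DInv (buildCells grid) (buildBoxes grid) := by
  unfold buildCells buildBoxes
  apply foldl_rel DInv _ _ ?_ _ _ _ ?_
  · intro a b r h
    apply foldl_rel DInv _ _ ?_ _ _ _ h
    intro a b c h
    simp only
    by_cases hc : PySem.List.pyGetD (PySem.List.pyGetD grid r []) c 0 ≠ 0
    · rw [if_pos hc, if_pos hc]
      exact dinv_step a b _ r c h
    · rw [if_neg hc, if_neg hc]
      exact h
  · exact ⟨List.nodup_nil, rfl, by intro p hp; cases hp⟩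

-- ===== VERDICT (by name: the statement is the Claim_ definition above) =====
theorem transform_spec : Claim_equal_transform := by
  intro grid _ _
  unfold Spec_transform transform transform_alt
  have h := dinv_loops grid
  obtain ⟨hnd, hitems, hne⟩ := h
  rw [hitems, findOdd_eq _ hne, keys_of_dinv ⟨hnd, hitems, hne⟩]
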